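-- pv_equiv track=rewrite | github.com/lfvvercosa/discover_analytics_analysis_lawsuit | clustering/StatsClust.py | get_ground_truth_by_cluster
-- ===== SOURCE A (Python) =====
-- def get_ground_truth_by_cluster(dict_var, traces, y_true):
--     gd = {}
--     dict_gd = {}
--
--     for i in range(len(traces)):
--         gd[traces[i]] = y_true[i]
--
--     for k in dict_var:
--         dict_gd[k] = {}
--
--         for t in dict_var[k]:
--             truth = 'G' + str(gd[t])
--
--             if truth not in dict_gd[k]:
--                 dict_gd[k][truth] = []
--
--             dict_gd[k][truth].append(t)
--
--
--     return dict_gd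
-- ===== SOURCE B (Python) =====
-- def get_ground_truth_by_cluster(dict_var, traces, y_true):
--     gd = dict(zip(traces, y_true))
--     return {
--         k: {lab: [t for t in ts if 'G' + str(gd[t]) == lab]
--             for lab in dict.fromkeys('G' + str(gd[t]) for t in ts)}
--         for k, ts in dict_var.items()
--     }
-- ===== Notes on version B (the rewrite author's own statement) =====
-- stated objective: simpler
-- what changed: Instead of A's one-pass mutable bucketing (create-empty-then-append into dict_gd[k][truth] while scanning), B builds gd by dict(zip(...)) and produces each cluster's grouping declaratively: the distinct labels in first-appearance order via dict.fromkeys, then one filter pass per label; no mutation, a single nested dict comprehension.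
import Mathlib
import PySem

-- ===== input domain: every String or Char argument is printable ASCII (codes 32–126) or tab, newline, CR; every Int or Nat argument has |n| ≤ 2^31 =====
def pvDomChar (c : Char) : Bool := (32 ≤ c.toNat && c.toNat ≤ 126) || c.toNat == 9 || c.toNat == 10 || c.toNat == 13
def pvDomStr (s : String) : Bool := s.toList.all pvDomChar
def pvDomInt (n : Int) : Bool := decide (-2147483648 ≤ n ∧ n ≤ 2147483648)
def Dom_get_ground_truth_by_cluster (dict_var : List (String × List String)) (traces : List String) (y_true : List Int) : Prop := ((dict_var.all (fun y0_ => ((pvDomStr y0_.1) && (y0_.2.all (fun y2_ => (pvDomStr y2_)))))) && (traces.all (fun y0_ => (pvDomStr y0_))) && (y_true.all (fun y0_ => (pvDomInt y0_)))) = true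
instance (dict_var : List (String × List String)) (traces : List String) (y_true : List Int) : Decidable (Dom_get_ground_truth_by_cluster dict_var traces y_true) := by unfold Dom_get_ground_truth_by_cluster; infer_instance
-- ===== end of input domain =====

-- ===== PORT A =====
-- Transliteration of A: gd filled by an index loop; dict_gd built by iterating the cluster dict,
-- inserting an empty inner dict per key and appending each trace into dict_gd[k][truth] in place.
def get_ground_truth_by_cluster (dict_var : List (String × List String)) (traces : List String) (y_true : List Int) : List (String × List (String × List String)) :=
  let gd : PySem.Dict String Int :=
    (PySem.List.pyRange 0 (traces.length : Int)).foldl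
      (fun gd i => gd.insert ((PySem.List.pyGet? traces i).getD "") ((PySem.List.pyGet? y_true i).getD 0))
      PySem.Dict.empty
  let dv : PySem.Dict String (List String) := PySem.Dict.mk dict_var
  let dict_gd : PySem.Dict String (PySem.Dict String (List String)) :=
    dict_var.foldl
      (fun dict_gd kv =>
        let dict_gd := dict_gd.insert kv.1 PySem.Dict.empty
        (dv.getD kv.1 []).foldl
          (fun dict_gd t =>
            let truth := "G" ++ PySem.Int.toStr (gd.getD t 0)
            let inner := dict_gd.getD kv.1 PySem.Dict.empty
            let inner := if inner.contains truth then inner else inner.insert truth []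
            dict_gd.insert kv.1 (inner.modify truth [] (fun l => l ++ [t])))
          dict_gd)
      PySem.Dict.empty
  dict_gd.items.map (fun p => (p.1, p.2.items))

-- ===== PORT B =====
-- B: gd = dict(zip(traces, y_true)); each cluster grouped declaratively — distinct labels in
-- first-appearance order (dict.fromkeys), then one filter pass per label.
def get_ground_truth_by_cluster_alt (dict_var : List (String × List String)) (traces : List String) (y_true : List Int) : List (String × List (String × List String)) :=
  let gd : PySem.Dict String Int := PySem.Dict.ofList (traces.zip y_true)
  dict_var.map (fun kv =>
    (kv.1,
      (PySem.List.dedup (kv.2.map (fun t => "G" ++ PySem.Int.toStr (gd.getD t 0)))).map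
        (fun lab => (lab, kv.2.filter (fun t => ("G" ++ PySem.Int.toStr (gd.getD t 0)) == lab)))))

-- ===== PRECONDITION & SPEC =====
-- Pre_ excludes (a) inputs where Python A raises: traces longer than y_true (IndexError on
-- y_true[i]) or a cluster trace absent from traces (KeyError on gd[t]); and (b) association lists
-- with duplicate keys, which do not arise from a Python dict argument (the dict collapses them
-- before A runs), so the list's first-vs-last-match behaviour is an artefact of the encoding.
def Pre_get_ground_truth_by_cluster (dict_var : List (String × List String)) (traces : List String) (y_true : List Int) : Prop :=
  traces.length ≤ y_true.length ∧ (dict_var.map Prod.fst).Nodup ∧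
    ∀ kv ∈ dict_var, ∀ t ∈ kv.2, t ∈ traces
instance (dict_var : List (String × List String)) (traces : List String) (y_true : List Int) : Decidable (Pre_get_ground_truth_by_cluster dict_var traces y_true) := by unfold Pre_get_ground_truth_by_cluster; infer_instance

def pvWitness_get_ground_truth_by_cluster : (List (String × List String)) × List String × List Int :=
  ([("c0", ["a", "b", "a"]), ("c1", ["b"])], ["a", "b"], [1, 0])

def Spec_get_ground_truth_by_cluster (dict_var : List (String × List String)) (traces : List String) (y_true : List Int) (out : List (String × List (String × List String))) : Prop := out = get_ground_truth_by_cluster_alt dict_var traces y_true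
instance (dict_var : List (String × List String)) (traces : List String) (y_true : List Int) (out : List (String × List (String × List String))) : Decidable (Spec_get_ground_truth_by_cluster dict_var traces y_true out) := by unfold Spec_get_ground_truth_by_cluster; infer_instance

-- ===== CLAIM (what is proved, stated in full; the proofs are below) =====
def Claim_equal_get_ground_truth_by_cluster : Prop := ∀ (dict_var : List (String × List String)) (traces : List String) (y_true : List Int), Dom_get_ground_truth_by_cluster dict_var traces y_true → Pre_get_ground_truth_by_cluster dict_var traces y_true → Spec_get_ground_truth_by_cluster dict_var traces y_true (get_ground_truth_by_cluster dict_var traces y_true)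

-- ===== LEMMAS AND PROOFS =====

-- A's gd loop over range(len(traces)) equals dict(zip(traces, y_true)) when y_true is long enough.
theorem pv_gd_eq (traces : List String) (y_true : List Int) (h : traces.length ≤ y_true.length) :
    (PySem.List.pyRange 0 (traces.length : Int)).foldl
      (fun gd i => gd.insert ((PySem.List.pyGet? traces i).getD "") ((PySem.List.pyGet? y_true i).getD 0))
      PySem.Dict.empty
    = PySem.Dict.ofList (traces.zip y_true) := by
  have hm : (List.range traces.length).map
      (fun (k : Nat) => (((PySem.List.pyGet? traces (k : Int)).getD ""), ((PySem.List.pyGet? y_true (k : Int)).getD 0)))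
      = traces.zip y_true := by
    apply List.ext_getElem
    · simp only [List.length_map, List.length_range, List.length_zip]; omega
    · intro i h1 h2
      have hi : i < traces.length := by simp only [List.length_map, List.length_range] at h1; omega
      have hiy : i < y_true.length := by omega
      simp only [List.getElem_map, List.getElem_range, List.getElem_zip,
        PySem.List.pyGet?_natCast, List.getElem?_eq_getElem hi, List.getElem?_eq_getElem hiy,
        Option.getD_some]
  rw [PySem.List.pyRange_zero_natCast, List.foldl_map]
  rw [show PySem.Dict.ofList (traces.zip y_true)
        = (traces.zip y_true).foldl (fun d p => d.insert p.1 p.2) PySem.Dict.empty from rfl]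
  rw [← hm, List.foldl_map]

-- The create-if-absent branch followed by append is just modify with default [].
theorem pv_mod_if (g : PySem.Dict String (List String)) (lab : String) (f : List String → List String) :
    (if g.contains lab then g else g.insert lab []).modify lab [] f = g.modify lab [] f := by
  by_cases h : g.contains lab
  · simp [h]
  · have h' : g.contains lab = false := by simpa using h
    simp only [h', Bool.false_eq_true, if_false]
    show (g.insert lab []).insert lab (f ((g.insert lab []).getD lab [])) = g.insert lab (f (g.getD lab []))
    rw [PySem.Dict.getD_insert_self, PySem.Dict.insert_insert_self, PySem.Dict.getD_of_not_contains _ _ h']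

-- A's inner loop, which rereads and rewrites dict_gd[k] each step, lifted to a fold on the inner dict.
theorem pv_inner_lift (lab : String → String) (k : String) (ts : List String)
    (dgd : PySem.Dict String (PySem.Dict String (List String))) (g : PySem.Dict String (List String)) :
    ts.foldl
      (fun dict_gd t =>
        let truth := lab t
        let inner := dict_gd.getD k PySem.Dict.empty
        let inner := if inner.contains truth then inner else inner.insert truth []
        dict_gd.insert k (inner.modify truth [] (fun l => l ++ [t])))
      (dgd.insert k g)
    = dgd.insert k (ts.foldl (fun g t => g.modify (lab t) [] (fun l => l ++ [t])) g) := by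
  simp only [pv_mod_if]
  induction ts generalizing g with
  | nil => rfl
  | cons t ts ih =>
    simp only [List.foldl_cons, PySem.Dict.getD_insert_self, PySem.Dict.insert_insert_self]
    exact ih _

-- The bucketing fold, as an items list: distinct labels in first-appearance order, one filter each.
theorem pv_inner_items (lab : String → String) (ts : List String) :
    (ts.foldl (fun g t => g.modify (lab t) [] (fun l => l ++ [t])) PySem.Dict.empty).items
    = (PySem.List.dedup (ts.map lab)).map (fun c => (c, ts.filter (fun t => lab t == c))) := by
  have hfold : ts.foldl (fun g t => g.modify (lab t) [] (fun l => l ++ [t])) PySem.Dict.empty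
      = (ts.map (fun t => (lab t, t))).foldl (fun d p => d.modify p.1 [] (fun l => l ++ [p.2])) PySem.Dict.empty := by
    rw [List.foldl_map]
  have hnd : (ts.foldl (fun g t => g.modify (lab t) [] (fun l => l ++ [t])) PySem.Dict.empty).keys.Nodup := by
    apply PySem.Dict.nodup_keys_foldl_modify_key ts lab [] (fun _ t => (fun l => l ++ [t]))
    simp [PySem.Dict.keys_empty]
  have hkeys : (ts.foldl (fun g t => g.modify (lab t) [] (fun l => l ++ [t])) PySem.Dict.empty).keys
      = PySem.List.dedup (ts.map lab) := by
    rw [PySem.Dict.keys_foldl_modify_key ts lab [] (fun _ t => (fun l => l ++ [t]))]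
    rfl
  rw [PySem.Dict.items_eq_map_keys _ hnd [], hkeys]
  apply List.map_congr_left
  intro c _
  rw [hfold, PySem.Dict.getD_foldl_modify_append]
  simp [PySem.Dict.getD_empty, List.filter_map, Function.comp_def]

-- ===== VERDICT (by name: the statement is the Claim_ definition above) =====
theorem get_ground_truth_by_cluster_spec : Claim_equal_get_ground_truth_by_cluster := by
  intro dict_var traces y_true _ hpre
  obtain ⟨hlen, hnd, hmem⟩ := hpre
  unfold Spec_get_ground_truth_by_cluster get_ground_truth_by_cluster get_ground_truth_by_cluster_alt
  simp only []
  rw [pv_gd_eq traces y_true hlen]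
  set gd : PySem.Dict String Int := PySem.Dict.ofList (traces.zip y_true) with hgd
  have hnd' : (PySem.Dict.mk dict_var).keys.Nodup := hnd
  have hstep : dict_var.foldl
      (fun dict_gd kv =>
        let dict_gd := dict_gd.insert kv.1 PySem.Dict.empty
        ((PySem.Dict.mk dict_var).getD kv.1 []).foldl
          (fun dict_gd t =>
            let truth := "G" ++ PySem.Int.toStr (gd.getD t 0)
            let inner := dict_gd.getD kv.1 PySem.Dict.empty
            let inner := if inner.contains truth then inner else inner.insert truth []
            dict_gd.insert kv.1 (inner.modify truth [] (fun l => l ++ [t])))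
          dict_gd)
      PySem.Dict.empty
      = dict_var.foldl
        (fun dict_gd kv => dict_gd.insert kv.1
          (kv.2.foldl (fun g t => g.modify ("G" ++ PySem.Int.toStr (gd.getD t 0)) [] (fun l => l ++ [t])) PySem.Dict.empty))
        PySem.Dict.empty := by
    apply PySem.List.foldl_congr_mem
    intro dgd kv hkv
    have hget : (PySem.Dict.mk dict_var).getD kv.1 [] = kv.2 :=
      PySem.Dict.getD_of_mem_items (PySem.Dict.mk dict_var) (by exact hkv) hnd' []
    simp only [hget]
    exact pv_inner_lift (fun t => "G" ++ PySem.Int.toStr (gd.getD t 0)) kv.1 kv.2 dgd PySem.Dict.empty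
  rw [hstep]
  have hfresh := PySem.Dict.items_foldl_insert_fresh (κ := String) (ν := PySem.Dict String (List String)) dict_var Prod.fst
      (fun kv => List.foldl (fun g t => g.modify ("G" ++ PySem.Int.toStr (gd.getD t 0)) [] (fun l => l ++ [t])) PySem.Dict.empty kv.2)
      PySem.Dict.empty (by intro a _; simp) hnd
  rw [hfresh]
  rw [show (PySem.Dict.empty : PySem.Dict String (PySem.Dict String (List String))).items = [] from rfl, List.nil_append, List.map_map]
  apply List.map_congr_left
  intro kv _
  simp only [Function.comp_def]
  exact congrArg (Prod.mk kv.1) (pv_inner_items (fun t => "G" ++ PySem.Int.toStr (gd.getD t 0)) kv.2)
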